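-- pv_equiv track=rewrite | github.com/wu-hongjun/AnimKit | animkit/scripts/animkit_zoetrope.py | get_numList
-- ===== SOURCE A (Python) =====
-- def get_numList(num):
--     '''
--     HELPER for padding_format().
--
--     Returns a broken down list of numbers with appropriate "-"
--     Example: get_numList(-24) -> ["-", "2", "4"] (Note the negative sign is its own char.)
--     Example: get_numList(0) -> ["0"]
--     Example: get_numList(24) -> ["2", "4"]
--     '''
--     # res function only accepts non-negative inputs.
--     isNeg = False
--     if (num < 0):
--         num = num * -1
--         isNeg = True
--
--     # Create a list of individual number strings from a given number.
--     res = list(map(str, [int(x) for x in str(num)]))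
--
--     # Add a negative sign string to the front of the list if the input number is negative.
--     if(isNeg):
--         res.insert(0, "-")
--
--     return(res)
-- ===== SOURCE B (Python) =====
-- def get_numList(num):
--     # Arithmetic digit extraction (mod/floordiv) instead of string conversion.
--     isNeg = num < 0
--     if isNeg:
--         num = -num
--     if num == 0:
--         res = ["0"]
--     else:
--         digits = []
--         while num > 0:
--             digits.append(str(num % 10))
--             num //= 10
--         res = digits[::-1]
--     if isNeg:
--         res = ["-"] + res
--     return res
-- ===== Notes on version B (the rewrite author's own statement) =====
-- stated objective: alternative
-- what changed: B extracts digits arithmetically with a modulo/floor-division loop and reverses the collected list, instead of converting the number to a string and round-tripping each character through int() and str().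
import Mathlib
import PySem

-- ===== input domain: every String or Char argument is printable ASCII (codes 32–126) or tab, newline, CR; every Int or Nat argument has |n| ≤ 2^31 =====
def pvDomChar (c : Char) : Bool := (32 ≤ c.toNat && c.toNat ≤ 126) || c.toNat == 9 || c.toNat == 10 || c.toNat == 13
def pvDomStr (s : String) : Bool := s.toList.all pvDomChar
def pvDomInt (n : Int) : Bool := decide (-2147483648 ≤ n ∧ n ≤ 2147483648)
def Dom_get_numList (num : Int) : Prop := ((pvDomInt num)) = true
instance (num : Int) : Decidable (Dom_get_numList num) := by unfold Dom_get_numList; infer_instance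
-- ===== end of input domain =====

-- B replaces A's string-conversion/round-trip digit split by an arithmetic %10 // //=10 extraction loop (alternative decomposition, same cost).


-- ===== PORT A =====
-- int(x) on a single char of str(num) (num ≥ 0 here) is always a digit, so ofChars? is
-- always `some`; the getD 0 default is never reached.
def get_numList (num : Int) : List String :=
  let p := if num < 0 then (num * -1, true) else (num, false)
  let res := (PySem.Int.toChars p.1).map
    (fun c => PySem.Int.toStr ((PySem.Int.ofChars? [c]).getD 0))
  if p.2 then PySem.List.insert res 0 "-" else res

-- ===== PORT B =====
-- the while loop of Source B: collect str(num % 10) while num > 0, num //= 10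
def bDigitsRev (num : Int) : List String :=
  if _h : 0 < num then
    PySem.Int.toStr (PySem.Int.mod num 10) :: bDigitsRev (PySem.Int.floordiv num 10)
  else []
termination_by num.toNat
decreasing_by
  have h10 : (0:Int) < 10 := by norm_num
  rw [PySem.Int.floordiv_eq_ediv_of_pos h10]
  omega

def get_numList_alt (num : Int) : List String :=
  let isNeg := num < 0
  let n := if isNeg then -num else num
  let res := if n = 0 then ["0"] else (bDigitsRev n).reverse
  if isNeg then "-" :: res else res

-- ===== PRECONDITION & SPEC =====
def Spec_get_numList (num : Int) (out : List String) : Prop := out = get_numList_alt num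
instance (num : Int) (out : List String) : Decidable (Spec_get_numList num out) := by unfold Spec_get_numList; infer_instance

-- ===== CLAIM (what is proved, stated in full; the proofs are below) =====
def Claim_equal_get_numList : Prop := ∀ (num : Int), Dom_get_numList num → Spec_get_numList num (get_numList num)

-- ===== LEMMAS AND PROOFS =====

-- A's per-character round trip str(int(c))
def pvMapA (c : Char) : String := PySem.Int.toStr ((PySem.Int.ofChars? [c]).getD 0)

-- big-endian decimal digit chars of n, the shape Nat.toDigits 10 produces
def pvDigitsBE (n : Nat) : List Char :=
  if _h : n < 10 then [Nat.digitChar n]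
  else pvDigitsBE (n / 10) ++ [Nat.digitChar (n % 10)]
termination_by n
decreasing_by omega

lemma pvMapA_digitChar (d : Nat) (hd : d < 10) :
    pvMapA (Nat.digitChar d) = PySem.Int.toStr (d : Int) := by
  interval_cases d <;> decide

lemma toDigitsCore_eq_pvDigitsBE (f : Nat) :
    ∀ (n : Nat) (acc : List Char), n < f →
      Nat.toDigitsCore 10 f n acc = pvDigitsBE n ++ acc := by
  induction f with
  | zero => intro n acc h; omega
  | succ f ih =>
    intro n acc h
    rw [Nat.toDigitsCore]
    by_cases h0 : n / 10 = 0
    · have hn : n < 10 := by omega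
      simp [h0, pvDigitsBE, hn, Nat.mod_eq_of_lt hn]
    · have hn : ¬ n < 10 := by omega
      have hlt : n / 10 < f := by omega
      simp only [h0, if_false, ih (n / 10) _ hlt]
      conv_rhs => rw [pvDigitsBE]
      simp [hn]

lemma toDigits_eq_pvDigitsBE (n : Nat) : Nat.toDigits 10 n = pvDigitsBE n := by
  have := toDigitsCore_eq_pvDigitsBE (n + 1) n [] (by omega)
  simpa [Nat.toDigits] using this

lemma bDigitsRev_reverse (n : Nat) (hn : 0 < n) :
    (bDigitsRev (n : Int)).reverse = (pvDigitsBE n).map pvMapA := by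
  induction n using Nat.strong_induction_on with
  | _ n ih =>
    rw [bDigitsRev]
    have hpos : (0:Int) < (n:Int) := by exact_mod_cast hn
    simp only [hpos, dif_pos]
    have hm : PySem.Int.mod (n:Int) 10 = ((n % 10 : Nat) : Int) := by
      exact_mod_cast PySem.Int.mod_natCast n 10
    have hf : PySem.Int.floordiv (n:Int) 10 = ((n / 10 : Nat) : Int) := by
      exact_mod_cast PySem.Int.floordiv_natCast n 10
    rw [hm, hf]
    by_cases h : n < 10
    · have h0 : n / 10 = 0 := by omega
      rw [h0]
      rw [bDigitsRev]
      simp only [show ¬ (0:Int) < ((0:Nat):Int) by simp, dif_neg, not_false_iff]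
      rw [pvDigitsBE]
      simp [h, Nat.mod_eq_of_lt h, pvMapA_digitChar n h]
    · have hq : 0 < n / 10 := by omega
      have hlt : n / 10 < n := by omega
      rw [pvDigitsBE]
      simp only [h, dif_neg, not_false_iff, List.map_append, List.reverse_cons]
      rw [ih (n / 10) hlt hq]
      simp [pvMapA_digitChar (n % 10) (Nat.mod_lt n (by omega))]

lemma res_eq (n : Int) (hn : 0 ≤ n) :
    (PySem.Int.toChars n).map pvMapA
      = if n = 0 then ["0"] else (bDigitsRev n).reverse := by
  by_cases h0 : n = 0
  · subst h0; decide
  · have hpos : 0 < n := lt_of_le_of_ne hn (Ne.symm h0)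
    have hnn : ¬ n < 0 := by omega
    obtain ⟨m, rfl⟩ := Int.eq_ofNat_of_zero_le hn
    have hm : 0 < m := by exact_mod_cast hpos
    simp only [h0, if_false]
    rw [bDigitsRev_reverse m hm]
    unfold PySem.Int.toChars
    simp [hnn, toDigits_eq_pvDigitsBE]

-- ===== VERDICT (by name: the statement is the Claim_ definition above) =====
theorem get_numList_spec : Claim_equal_get_numList := by
  intro num _
  unfold Spec_get_numList get_numList get_numList_alt
  by_cases hneg : num < 0
  · simp only [hneg, if_pos]
    have key := res_eq (num * -1) (by omega)
    have : num * -1 = -num := by ring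
    rw [this] at key
    have hne : ¬ (-num = 0) := by omega
    simp only [hne, if_false] at key
    show PySem.List.insert ((PySem.Int.toChars (num * -1)).map pvMapA) 0 "-" = _
    rw [this, key]
    simp [PySem.List.insert, PySem.List.sliceIndices, hne]
  · simp only [hneg, if_neg, not_false_iff]
    have key := res_eq num (by omega)
    show (PySem.Int.toChars num).map pvMapA = _
    rw [key]
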